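-- pv_equiv track=rewrite | github.com/jeonghi/2021_Algorithm_Study | section4/씨름선수.py | solution
-- ===== SOURCE A (Python) =====
-- def solution(applicants):
--     applicants.sort(key=lambda x:x[0])
--     count = 0
--     for idx , applicant in enumerate(applicants) :
--         if idx == len(applicants)-1:
--             count += 1
--             return count
--         else:
--             flag = True
--             for i in range(idx,len(applicants)):
--                 if applicant[1] < applicants[i][1]:
--                     flag = False
--             if flag :
--                 count += 1
-- ===== SOURCE B (Python) =====
-- def solution(applicants):
--     applicants.sort(key=lambda x: x[0])
--     count = 0
--     best = None
--     for a in reversed(applicants):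
--         if best is None or a[1] >= best:
--             count += 1
--             best = a[1]
--     return count
-- ===== Notes on version B (the rewrite author's own statement) =====
-- stated objective: faster
-- what changed: A rescans the whole suffix for every position after sorting; B makes a single right-to-left pass over the sorted list maintaining the running suffix maximum of the second component.
-- outside the precondition, e.g. on solution([]): A returns None, B returns 0; on solution([[5]]): A returns 1, B raises IndexError
import Mathlib
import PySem

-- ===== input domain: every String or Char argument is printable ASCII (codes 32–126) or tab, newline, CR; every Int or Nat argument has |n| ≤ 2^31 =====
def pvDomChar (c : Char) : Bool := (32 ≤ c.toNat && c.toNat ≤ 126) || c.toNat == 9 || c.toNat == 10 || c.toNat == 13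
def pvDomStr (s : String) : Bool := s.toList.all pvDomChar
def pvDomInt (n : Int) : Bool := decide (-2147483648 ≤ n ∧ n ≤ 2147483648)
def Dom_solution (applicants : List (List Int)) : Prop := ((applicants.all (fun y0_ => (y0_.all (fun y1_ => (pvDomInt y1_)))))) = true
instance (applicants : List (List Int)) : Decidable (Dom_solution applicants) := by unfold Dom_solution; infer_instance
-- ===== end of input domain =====

-- B replaces A's quadratic inner rescan of the suffix by one right-to-left pass over the
-- sorted list keeping the running suffix maximum of the second component (objective: faster).
-- Both A and B sort the argument list in place; the equivalence proved here is about the return value.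

-- ===== PORT A =====
-- x[0] / x[1]: inside Pre_ every element has length ≥ 2, so pyGetD's default is never used.
def pvKey (x : List Int) : Int := PySem.List.pyGetD x 0 0
def pvSnd (x : List Int) : Int := PySem.List.pyGetD x 1 0

def solGo (s : List (List Int)) : List (Int × List Int) → Int → Option Int
  | [], _ => none
  | (idx, applicant) :: rest, count =>
    if idx = PySem.List.len s - 1 then some (count + 1)
    else
      let flag := (PySem.List.pyRange idx (PySem.List.len s)).foldl
        (fun fl i => if pvSnd applicant < pvSnd (PySem.List.pyGetD s i []) then false else fl) true
      solGo s rest (if flag then count + 1 else count)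

-- Python returns None when the loop body never returns (empty input); that case is outside
-- Pre_ and the port totalizes it with .getD 0.
def solution (applicants : List (List Int)) : Int :=
  let s := PySem.List.sorted applicants pvKey
  (solGo s (PySem.List.enumerate s) 0).getD 0

-- ===== PORT B =====
def altGo : List (List Int) → Int → Option Int → Int
  | [], count, _ => count
  | a :: rest, count, best =>
    match best with
    | none => altGo rest (count + 1) (some (pvSnd a))
    | some b => if pvSnd a ≥ b then altGo rest (count + 1) (some (pvSnd a))
                else altGo rest count (some b)

def solution_alt (applicants : List (List Int)) : Int :=
  let s := PySem.List.sorted applicants pvKey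
  altGo s.reverse 0 none

-- ===== PRECONDITION & SPEC =====
-- Pre_ excludes the empty list (A returns None, not an int) and inputs containing an element of
-- length < 2, on which Python A raises IndexError — except the single-element input [[n]], where
-- A returns 1 but B itself raises IndexError, so it stays excluded.
def Pre_solution (applicants : List (List Int)) : Prop :=
  applicants ≠ [] ∧ ∀ x ∈ applicants, 2 ≤ x.length
instance (applicants : List (List Int)) : Decidable (Pre_solution applicants) := by
  unfold Pre_solution; infer_instance

def pvWitness_solution : List (List Int) := [[1, 2], [3, 4], [3, 1]]

def Spec_solution (applicants : List (List Int)) (out : Int) : Prop := out = solution_alt applicants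
instance (applicants : List (List Int)) (out : Int) : Decidable (Spec_solution applicants out) := by
  unfold Spec_solution; infer_instance

-- ===== CLAIM (what is proved, stated in full; the proofs are below) =====
def Claim_equal_solution : Prop := ∀ (applicants : List (List Int)), Dom_solution applicants → Pre_solution applicants → Spec_solution applicants (solution applicants)

-- ===== LEMMAS AND PROOFS =====

-- Reference count: positions whose second component is ≥ every later second component.
def countRec : List (List Int) → Int
  | [] => 0
  | a :: rest => (if rest.all (fun x => pvSnd x ≤ pvSnd a) then 1 else 0) + countRec rest

lemma foldl_ite_false (p : List Int → Prop) [DecidablePred p] :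
    ∀ (l : List (List Int)) (b : Bool),
      l.foldl (fun fl x => if p x then false else fl) b = (b && l.all (fun x => decide ¬ p x)) := by
  intro l
  induction l with
  | nil => simp
  | cons a t ih =>
      intro b
      have h0 : (a :: t).foldl (fun fl x => if p x then false else fl) b
          = t.foldl (fun fl x => if p x then false else fl) (if p a then false else b) := rfl
      rw [h0]
      by_cases h : p a
      · rw [if_pos h, ih false]; simp [h]
      · rw [if_neg h, ih b]; simp [h]

lemma solGo_eq (s : List (List Int)) :
    ∀ (t pre : List (List Int)) (count : Int), s = pre ++ t → t ≠ [] →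
      solGo s (PySem.List.enumerate t (pre.length : Int)) count = some (count + countRec t) := by
  intro t
  induction t with
  | nil => intro pre count _ h; exact absurd rfl h
  | cons a rest ih =>
      intro pre count hs _
      rw [PySem.List.enumerate_cons]
      rcases rest with _ | ⟨b, rest'⟩
      · -- last element: idx = len s - 1
        have hlen : PySem.List.len s = (pre.length : Int) + 1 := by
          simp [PySem.List.len_eq, hs]
        simp only [solGo]
        rw [if_pos (by rw [hlen]; ring)]
        simp [countRec]
      · -- not last
        have hlen : PySem.List.len s = (pre.length : Int) + 2 + rest'.length := by
          simp [PySem.List.len_eq, hs]; ring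
        have hflag :
            (PySem.List.pyRange (pre.length : Int) (PySem.List.len s)).foldl
              (fun fl i => if pvSnd a < pvSnd (PySem.List.pyGetD s i []) then false else fl) true
            = (b :: rest').all (fun x => decide (pvSnd x ≤ pvSnd a)) := by
          rw [PySem.List.foldl_pyRange_pyGetD s [] (fun fl x => if pvSnd a < pvSnd x then false else fl) true (Int.natCast_nonneg _)]
          have hdrop : List.drop ((pre.length : Int)).toNat s = a :: b :: rest' := by
            simp [hs]
          rw [hdrop, foldl_ite_false (fun x => pvSnd a < pvSnd x)]
          simp [not_lt]
        simp only [solGo]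
        rw [if_neg (by rw [hlen]; omega), hflag]
        have hs' : s = (pre ++ [a]) ++ b :: rest' := by simp [hs]
        have e1 : (((pre ++ [a]).length : Nat) : Int) = (pre.length : Int) + 1 := by
          simp
        split_ifs with hc
        · have h2 := ih (pre ++ [a]) (count + 1) hs' (by simp)
          rw [e1] at h2
          rw [h2]
          have hcr : countRec (a :: b :: rest')
              = (if (b :: rest').all (fun x => pvSnd x ≤ pvSnd a) then (1:Int) else 0)
                + countRec (b :: rest') := rfl
          rw [hcr, if_pos hc]
          congr 1; ring
        · have h2 := ih (pre ++ [a]) count hs' (by simp)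
          rw [e1] at h2
          rw [h2]
          have hcr : countRec (a :: b :: rest')
              = (if (b :: rest').all (fun x => pvSnd x ≤ pvSnd a) then (1:Int) else 0)
                + countRec (b :: rest') := rfl
          rw [hcr, if_neg hc]
          congr 1; ring

-- B-side: condition of the branch, running suffix maximum, and the reverse-scan characterisation.
def condB (best : Option Int) (v : Int) : Bool :=
  match best with
  | none => true
  | some m => v ≥ m

def bestAfter : List (List Int) → Option Int → Option Int
  | [], b => b
  | a :: rest, b => bestAfter rest (if condB b (pvSnd a) then some (pvSnd a) else b)

lemma altGo_cons (a : List Int) (rest : List (List Int)) (count : Int) (best : Option Int) :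
    altGo (a :: rest) count best
      = altGo rest (if condB best (pvSnd a) then count + 1 else count)
          (if condB best (pvSnd a) then some (pvSnd a) else best) := by
  cases best with
  | none => simp [altGo, condB]
  | some m =>
      by_cases h : pvSnd a ≥ m <;> simp [altGo, condB, h]

lemma altGo_append (l1 l2 : List (List Int)) :
    ∀ (count : Int) (best : Option Int),
      altGo (l1 ++ l2) count best = altGo l2 (altGo l1 count best) (bestAfter l1 best) := by
  induction l1 with
  | nil => intro count best; simp [altGo, bestAfter]
  | cons a t ih =>
      intro count best
      rw [List.cons_append, altGo_cons, altGo_cons, ih]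
      rfl

lemma condB_step (v w : Int) (b : Option Int) :
    condB (if condB b w then some w else b) v = (decide (w ≤ v) && condB b v) := by
  cases b with
  | none => simp [condB, ge_iff_le]
  | some m =>
      by_cases h : m ≤ w
      · rw [if_pos (by simp [condB, ge_iff_le, h])]
        simp only [condB, ge_iff_le]
        by_cases h2 : w ≤ v
        · simp [h2]; omega
        · simp [h2]
      · rw [if_neg (by simp [condB, ge_iff_le, h])]
        simp only [condB, ge_iff_le]
        by_cases h2 : m ≤ v
        · simp [h2, show w ≤ v by omega]
        · simp [h2]

lemma condB_bestAfter (v : Int) :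
    ∀ (l : List (List Int)) (b : Option Int),
      condB (bestAfter l b) v = (l.all (fun x => decide (pvSnd x ≤ v)) && condB b v) := by
  intro l
  induction l with
  | nil => simp [bestAfter]
  | cons a t ih =>
      intro b
      rw [bestAfter, ih, condB_step]
      simp only [List.all_cons]
      cases t.all (fun x => decide (pvSnd x ≤ v)) <;>
        cases condB b v <;> simp

lemma altGo_reverse : ∀ (vs : List (List Int)) (count : Int),
    altGo vs.reverse count none = count + countRec vs := by
  intro vs
  induction vs with
  | nil => intro count; simp [altGo, countRec]
  | cons a rest ih =>
      intro count
      rw [List.reverse_cons, altGo_append, ih, altGo_cons]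
      simp only [altGo]
      rw [condB_bestAfter]
      simp only [condB, Bool.and_true, List.all_reverse]
      have hcr : countRec (a :: rest)
          = (if rest.all (fun x => pvSnd x ≤ pvSnd a) then (1:Int) else 0) + countRec rest := rfl
      rw [hcr]
      split_ifs <;> ring

lemma main_eq (s : List (List Int)) (hne : s ≠ []) :
    (solGo s (PySem.List.enumerate s) 0).getD 0 = altGo s.reverse 0 none := by
  rcases hs : s with _ | ⟨a, t⟩
  · exact absurd hs hne
  · have h := solGo_eq (a :: t) (a :: t) [] 0 (by simp) (by simp)
    simp only [List.length_nil, Nat.cast_zero] at h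
    rw [h, altGo_reverse]
    simp

-- ===== VERDICT (by name: the statement is the Claim_ definition above) =====
theorem solution_spec : Claim_equal_solution := by
  intro applicants _ hpre
  show (let s := PySem.List.sorted applicants pvKey
        (solGo s (PySem.List.enumerate s) 0).getD 0)
      = (let s := PySem.List.sorted applicants pvKey
         altGo s.reverse 0 none)
  apply main_eq
  intro hnil
  have hp := PySem.List.sorted_perm applicants pvKey false
  rw [hnil] at hp
  exact hpre.1 hp.symm.eq_nil
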